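-- pv_equiv track=rewrite | github.com/ablake8788/MLSA-gap-analysis-Ref-RobastDB-GIT | tga_cli/renderers/pptx_renderer.py | _is_md_table_sep
-- ===== SOURCE A (Python) =====
-- def _is_md_table_sep(line: str) -> bool:
--     s = line.strip()
--     if not (s.startswith("|") and s.endswith("|")):
--         return False
--     cells = [c.strip() for c in s.strip("|").split("|")]
--     if not cells:
--         return False
--     for c in cells:
--         c2 = c.replace(":", "").replace("-", "")
--         if c2 != "":
--             return False
--     return True
-- ===== SOURCE B (Python) =====
-- def _is_md_table_sep(line: str) -> bool:
--     # Single left-to-right scan (no split, no per-cell cleanup): after the leading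
--     # pipe, repeatedly consume one cell (optional whitespace, dashes/colons,
--     # optional whitespace) followed by a closing pipe.
--     s = line.strip()
--     if not s.startswith("|"):
--         return False
--     i, n = 1, len(s)
--     while i < n:
--         while i < n and s[i] in " \t\n\r\x0b\x0c":
--             i += 1
--         while i < n and s[i] in "-:":
--             i += 1
--         while i < n and s[i] in " \t\n\r\x0b\x0c":
--             i += 1
--         if i < n and s[i] == "|":
--             i += 1
--         else:
--             return False
--     return True
-- ===== Notes on version B (the rewrite author's own statement) =====
-- stated objective: alternative
-- what changed: A strips pipes, splits the line into cells and cleans each cell with two str.replace passes plus a per-cell strip; B makes a single left-to-right index scan that, after the leading pipe, repeatedly consumes one cell (optional whitespace, then dashes/colons, then optional whitespace, then the closing pipe), building no intermediate lists or strings.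
import Mathlib
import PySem

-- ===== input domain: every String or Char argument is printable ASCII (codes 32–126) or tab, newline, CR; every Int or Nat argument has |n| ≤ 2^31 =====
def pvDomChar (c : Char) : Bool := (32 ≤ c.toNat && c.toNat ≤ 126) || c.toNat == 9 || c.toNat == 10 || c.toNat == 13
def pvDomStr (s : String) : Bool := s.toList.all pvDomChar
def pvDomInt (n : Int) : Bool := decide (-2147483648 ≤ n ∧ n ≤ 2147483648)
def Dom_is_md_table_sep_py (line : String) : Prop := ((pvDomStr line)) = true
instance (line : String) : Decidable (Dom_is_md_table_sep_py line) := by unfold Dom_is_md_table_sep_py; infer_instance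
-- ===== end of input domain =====

-- B replaces A's strip-pipes/split/per-cell replace-cleanup pipeline by a single
-- left-to-right index scan consuming, after the leading pipe, one cell at a time
-- (optional whitespace, dashes/colons, optional whitespace, closing pipe); same
-- return value (alternative decomposition, no speed claim).

-- ===== PORT A =====
-- A's per-cell loop: for c in cells: if c.replace(":","").replace("-","") != "": return False
def pvCheckCells : List (List Char) → Bool
  | [] => true
  | c :: rest =>
    let c2 := PySem.Chars.replace (PySem.Chars.replace c [':'] []) ['-'] []
    if c2 ≠ [] then false else pvCheckCells rest

def is_md_table_sep_py (line : String) : Bool :=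
  let s := PySem.Chars.strip line.toList
  if !(PySem.Chars.startswith s ['|'] && PySem.Chars.endswith s ['|']) then false
  else
    let cells := (PySem.Chars.splitOn (PySem.Chars.stripChars s ['|']) ['|']).map PySem.Chars.strip
    if cells.isEmpty then false
    else pvCheckCells cells

-- ===== PORT B =====
-- ch in " \t\n\r\x0b\x0c"
def pvCellWs (c : Char) : Bool := ([' ', '\t', '\n', '\r', '\x0B', '\x0C'] : List Char).contains c
-- ch in "-:"
def pvCellDash (c : Char) : Bool := (['-', ':'] : List Char).contains c

-- B's outer while-loop; each inner index-advancing while over a char class is a dropWhile,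
-- then the scan expects a pipe (head) and continues after it (tail)
def pvScan (l : List Char) : Bool :=
  match l with
  | [] => true
  | c :: t =>
    let l3 := (((c :: t).dropWhile pvCellWs).dropWhile pvCellDash).dropWhile pvCellWs
    if h : l3.head? = some '|' then pvScan l3.tail else false
termination_by l.length
decreasing_by
  have h1 : ((((c :: t).dropWhile pvCellWs).dropWhile pvCellDash).dropWhile pvCellWs).length ≤ (c :: t).length := by
    have a := List.length_dropWhile_le (p := pvCellWs) (l := c :: t)
    have b := List.length_dropWhile_le (p := pvCellDash) (l := (c :: t).dropWhile pvCellWs)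
    have d := List.length_dropWhile_le (p := pvCellWs) (l := ((c :: t).dropWhile pvCellWs).dropWhile pvCellDash)
    omega
  have h2 : l3 ≠ [] := by intro hnil; rw [hnil] at h; simp at h
  have h3 : l3.tail.length < l3.length := by
    have hp : 0 < l3.length := List.length_pos_of_ne_nil h2
    simp only [List.length_tail]
    omega
  simpa using Nat.lt_of_lt_of_le h3 h1

def is_md_table_sep_py_alt (line : String) : Bool :=
  let s := PySem.Chars.strip line.toList
  if PySem.Chars.startswith s ['|'] then pvScan (s.drop 1) else false

-- ===== PRECONDITION & SPEC =====
def Spec_is_md_table_sep_py (line : String) (out : Bool) : Prop := out = is_md_table_sep_py_alt line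
instance (line : String) (out : Bool) : Decidable (Spec_is_md_table_sep_py line out) := by unfold Spec_is_md_table_sep_py; infer_instance

-- ===== CLAIM (what is proved, stated in full; the proofs are below) =====
def Claim_equal_is_md_table_sep_py : Prop := ∀ (line : String), Dom_is_md_table_sep_py line → Spec_is_md_table_sep_py line (is_md_table_sep_py line)

-- ===== LEMMAS AND PROOFS =====

-- splitting on a single character, as a simple structural recursion
def sSplit (p : Char) : List Char → List (List Char)
  | [] => [[]]
  | c :: t => if c = p then [] :: sSplit p t else (sSplit p t).modifyHead (c :: ·)

def consFirst (pre : List Char) : List (List Char) → List (List Char)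
  | [] => [pre]
  | h :: t => (pre ++ h) :: t

-- a cell is acceptable to A iff after stripping it consists of '-'/':' only
def cellOK (c : List Char) : Bool := (PySem.Chars.strip c).all pvCellDash

-- lstrip+rstrip with B's whitespace class (equal to Python strip on the ASCII domain)
def strip' (c : List Char) : List Char :=
  ((c.dropWhile pvCellWs).reverse.dropWhile pvCellWs).reverse

theorem sSplit_ne_nil (p : Char) (l : List Char) : sSplit p l ≠ [] := by
  induction l with
  | nil => simp [sSplit]
  | cons c t ih =>
    simp only [sSplit]
    split
    · simp
    · cases h : sSplit p t with
      | nil => exact absurd h ih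
      | cons a b => simp

theorem go_eq (p : Char) (fuel : Nat) : ∀ (l cur : List Char) (acc : List (List Char)),
    l.length < fuel →
    PySem.Chars.splitOn.go [p] fuel l cur acc = acc.reverse ++ consFirst cur.reverse (sSplit p l) := by
  induction fuel with
  | zero => intro l cur acc h; omega
  | succ f ih =>
    intro l cur acc h
    cases l with
    | nil => simp [PySem.Chars.splitOn.go, sSplit, consFirst]
    | cons c rest =>
      rw [PySem.Chars.splitOn.go]
      have hlen : rest.length < f := by simp at h; omega
      by_cases hc : c = p
      · have hpre : [p].isPrefixOf (c :: rest) = true := by simp [List.isPrefixOf, hc]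
        simp only [hpre, if_true, List.length_cons, List.length_nil, List.drop_succ_cons,
          List.drop_zero]
        rw [ih rest [] (cur.reverse :: acc) hlen]
        simp only [sSplit, hc, if_true, List.reverse_cons, List.reverse_nil]
        cases hs : sSplit p rest with
        | nil => exact absurd hs (sSplit_ne_nil p rest)
        | cons a b => simp [consFirst]
      · have hpre : [p].isPrefixOf (c :: rest) = false := by
          simp [List.isPrefixOf]; exact fun hh => hc hh.symm
        simp only [hpre, Bool.false_eq_true, if_false]
        rw [ih rest (c :: cur) acc hlen]
        simp only [sSplit, hc, if_false, List.reverse_cons]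
        cases hs : sSplit p rest with
        | nil => exact absurd hs (sSplit_ne_nil p rest)
        | cons a b => simp [consFirst]

theorem splitOn_singleton (p : Char) (l : List Char) :
    PySem.Chars.splitOn l [p] = sSplit p l := by
  rw [PySem.Chars.splitOn, go_eq p (l.length + 1) l [] [] (by omega)]
  cases hs : sSplit p l with
  | nil => exact absurd hs (sSplit_ne_nil p l)
  | cons a b => simp [consFirst]

theorem replaceGo_eq (d : Char) (l : List Char) : ∀ (fuel : Nat) (acc : List Char),
    l.length ≤ fuel →
    PySem.Chars.replace.go [d] [] fuel l acc = acc.reverse ++ l.filter (fun c => !(c == d)) := by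
  induction l with
  | nil =>
    intro fuel acc h
    cases fuel with
    | zero => simp [PySem.Chars.replace.go]
    | succ f => simp [PySem.Chars.replace.go]
  | cons c t ih =>
    intro fuel acc h
    cases fuel with
    | zero => simp at h
    | succ f =>
      rw [PySem.Chars.replace.go]
      have hlen : t.length ≤ f := by simp at h; omega
      by_cases hc : c = d
      · have hpre : [d].isPrefixOf (c :: t) = true := by simp [List.isPrefixOf, hc]
        simp only [hpre, if_true, List.length_cons, List.length_nil, List.drop_succ_cons,
          List.drop_zero, List.reverse_nil, List.nil_append]
        rw [ih f acc hlen]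
        simp [List.filter, hc]
      · have hpre : [d].isPrefixOf (c :: t) = false := by
          simp [List.isPrefixOf]; exact fun hh => hc hh.symm
        simp only [hpre, Bool.false_eq_true, if_false]
        rw [ih f (c :: acc) hlen]
        have : (!(c == d)) = true := by simp [hc]
        simp [List.filter, this]

theorem replace_single_nil (d : Char) (l : List Char) :
    PySem.Chars.replace l [d] [] = l.filter (fun c => !(c == d)) := by
  rw [PySem.Chars.replace]
  simp only [List.isEmpty_cons, Bool.false_eq_true, if_false]
  exact replaceGo_eq d l l.length [] le_rfl

theorem okA_eq (c : List Char) :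
    (PySem.Chars.replace (PySem.Chars.replace c [':'] []) ['-'] [] == []) = c.all pvCellDash := by
  rw [replace_single_nil, replace_single_nil, List.filter_filter]
  rcases h : (c.all pvCellDash) with _ | _
  · rw [List.all_eq_false] at h
    obtain ⟨x, hx, hpx⟩ := h
    rw [Bool.eq_false_iff]
    intro hfil
    rw [beq_iff_eq, List.filter_eq_nil_iff] at hfil
    have := hfil x hx
    simp [pvCellDash] at hpx this
    tauto
  · simp only [List.all_eq_true] at h
    simp only [beq_iff_eq, List.filter_eq_nil_iff]
    intro x hx
    have := h x hx
    simp [pvCellDash] at this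
    rcases this with h1 | h1 <;> simp [h1]

theorem pvCheckCells_eq (L : List (List Char)) :
    pvCheckCells L = L.all (fun c => PySem.Chars.replace (PySem.Chars.replace c [':'] []) ['-'] [] == []) := by
  induction L with
  | nil => rfl
  | cons c rest ih =>
    simp only [pvCheckCells, List.all_cons, ← ih]
    by_cases h : PySem.Chars.replace (PySem.Chars.replace c [':'] []) ['-'] [] = []
    · simp [h]
    · simp [h]

theorem char_eq_iff_toNat (a b : Char) : a = b ↔ a.toNat = b.toNat := eq_iff_eq_of_cmp_eq_cmp rfl

theorem ws_eq (c : Char) (h : pvDomChar c = true) : pvCellWs c = PySem.Chars.isspace c := by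
  simp only [pvDomChar, Bool.or_eq_true, Bool.and_eq_true, decide_eq_true_eq, beq_iff_eq] at h
  have h1 : pvCellWs c = true ↔
      (c.toNat = 32 ∨ c.toNat = 9 ∨ c.toNat = 10 ∨ c.toNat = 13 ∨ c.toNat = 11 ∨ c.toNat = 12) := by
    simp [pvCellWs, char_eq_iff_toNat]
  have h2 : PySem.Chars.isspace c = true ↔
      (((((((((((c.toNat = 32 ∨ 9 ≤ c.toNat ∧ c.toNat ≤ 13) ∨ 28 ≤ c.toNat ∧ c.toNat ≤ 31) ∨ c.toNat = 133) ∨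
          c.toNat = 160) ∨ c.toNat = 5760) ∨ 8192 ≤ c.toNat ∧ c.toNat ≤ 8202) ∨ c.toNat = 8232) ∨
          c.toNat = 8233) ∨ c.toNat = 8239) ∨ c.toNat = 8287) ∨ c.toNat = 12288) := by
    unfold PySem.Chars.isspace
    simp only [Bool.or_eq_true, Bool.and_eq_true, decide_eq_true_eq]
  rcases hws : pvCellWs c <;> rcases his : PySem.Chars.isspace c <;> try rfl
  · rw [hws] at h1; rw [his] at h2; simp at h1 h2; omega
  · rw [hws] at h1; rw [his] at h2; simp at h1 h2; omega

theorem dash_not_ws (x : Char) (h : pvCellDash x = true) : pvCellWs x = false := by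
  simp [pvCellDash] at h
  rcases h with h | h <;> subst h <;> decide

theorem dw_of_all_false {α : Type} (p : α → Bool) (l : List α) (h : ∀ x ∈ l, p x = false) :
    l.dropWhile p = l := by
  cases l with
  | nil => rfl
  | cons a t => rw [List.dropWhile_cons_of_neg (by simp [h a (by simp)])]

theorem dw_of_all_true {α : Type} (p : α → Bool) (l : List α) (h : ∀ x ∈ l, p x = true) :
    l.dropWhile p = [] := by
  rw [List.dropWhile_eq_nil_iff]
  intro x hx; exact h x hx

theorem dwCongr {α : Type} (p q : α → Bool) (l : List α) (h : ∀ x ∈ l, p x = q x) :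
    l.dropWhile p = l.dropWhile q := by
  induction l with
  | nil => rfl
  | cons a t ih =>
    simp only [List.dropWhile_cons]
    rw [h a (by simp)]
    split
    · exact ih fun x hx => h x (by simp [hx])
    · rfl

theorem strip'_spec (w1 dseg w2 : List Char)
    (h1 : ∀ x ∈ w1, pvCellWs x = true) (h2 : ∀ x ∈ dseg, pvCellDash x = true)
    (h3 : ∀ x ∈ w2, pvCellWs x = true) :
    strip' (w1 ++ dseg ++ w2) = dseg := by
  unfold strip'
  rw [List.append_assoc, List.dropWhile_append, dw_of_all_true pvCellWs w1 h1]
  simp only [List.isEmpty_nil, if_true]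
  cases dseg with
  | nil =>
    simp only [List.nil_append]
    rw [dw_of_all_true pvCellWs w2 h3]
    simp
  | cons e d' =>
    rw [List.cons_append, List.dropWhile_cons_of_neg (by simp [dash_not_ws e (h2 e (by simp))])]
    simp only [List.reverse_cons, List.reverse_append]
    rw [List.append_assoc, List.dropWhile_append, dw_of_all_true pvCellWs w2.reverse
      (fun x hx => h3 x (List.mem_reverse.mp hx))]
    simp only [List.isEmpty_nil, if_true]
    rw [dw_of_all_false pvCellWs (d'.reverse ++ [e]) (fun x hx => by
      rcases List.mem_append.mp hx with hx' | hx'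
      · exact dash_not_ws x (h2 x (by simp [List.mem_reverse.mp hx']))
      · simp at hx'; subst hx'; exact dash_not_ws x (h2 x (by simp)))]
    simp

theorem cell_parse' (c : List Char) :
    (((c.dropWhile pvCellWs).dropWhile pvCellDash).dropWhile pvCellWs = []) ↔
      (strip' c).all pvCellDash = true := by
  constructor
  · intro hp
    have hc : c = c.takeWhile pvCellWs ++
        ((c.dropWhile pvCellWs).takeWhile pvCellDash ++
          ((c.dropWhile pvCellWs).dropWhile pvCellDash)) := by
      rw [List.takeWhile_append_dropWhile, List.takeWhile_append_dropWhile]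
    rw [show strip' c = strip' (c.takeWhile pvCellWs ++
        (c.dropWhile pvCellWs).takeWhile pvCellDash ++
        ((c.dropWhile pvCellWs).dropWhile pvCellDash)) by rw [List.append_assoc, ← hc]]
    rw [strip'_spec _ _ _ (fun x hx => List.mem_takeWhile_imp hx)
      (fun x hx => List.mem_takeWhile_imp hx)
      (fun x hx => by
        rw [List.dropWhile_eq_nil_iff] at hp
        exact hp x hx)]
    simp only [List.all_eq_true]
    exact fun x hx => List.mem_takeWhile_imp hx
  · intro hall
    have hm : c.dropWhile pvCellWs = strip' c ++
        ((c.dropWhile pvCellWs).reverse.takeWhile pvCellWs).reverse := by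
      unfold strip'
      rw [← List.reverse_append, List.takeWhile_append_dropWhile, List.reverse_reverse]
    rw [hm, List.dropWhile_append]
    split
    · apply dw_of_all_true
      intro x hx
      have := List.dropWhile_sublist (p := pvCellDash)
        (l := ((c.dropWhile pvCellWs).reverse.takeWhile pvCellWs).reverse)
      have hmem := this.subset hx
      exact List.mem_takeWhile_imp (List.mem_reverse.mp hmem)
    · exfalso
      rename_i hne
      rw [List.isEmpty_iff] at hne
      apply hne
      apply dw_of_all_true
      intro x hx
      simp only [List.all_eq_true] at hall
      exact hall x hx

theorem strip'_eq_strip (c : List Char) (hdom : c.all pvDomChar = true) :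
    strip' c = PySem.Chars.strip c := by
  rw [List.all_eq_true] at hdom
  unfold strip' PySem.Chars.strip PySem.Chars.rstrip PySem.Chars.lstrip
  rw [dwCongr pvCellWs PySem.Chars.isspace c (fun x hx => ws_eq x (hdom x hx))]
  rw [dwCongr pvCellWs PySem.Chars.isspace _ (fun x hx => ws_eq x (hdom x
    ((List.dropWhile_sublist _).subset (List.mem_reverse.mp hx))))]

theorem cell_parse (c : List Char) (hdom : c.all pvDomChar = true) :
    (((c.dropWhile pvCellWs).dropWhile pvCellDash).dropWhile pvCellWs = []) ↔ cellOK c = true := by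
  rw [cell_parse' c]
  unfold cellOK
  rw [strip'_eq_strip c hdom]

theorem cellOK_nil : cellOK [] = true := by decide

theorem dw_append_pipe (p : Char → Bool) (hp : p '|' = false) (xs ys : List Char) :
    List.dropWhile p (xs ++ '|' :: ys) = xs.dropWhile p ++ '|' :: ys := by
  rw [List.dropWhile_append]
  split
  · rename_i he
    rw [List.isEmpty_iff] at he
    rw [he, List.nil_append, List.dropWhile_cons_of_neg (by simp [hp])]
  · rfl

theorem parse3_append (cell rest : List Char) :
    ((((cell ++ '|' :: rest).dropWhile pvCellWs).dropWhile pvCellDash).dropWhile pvCellWs) =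
      (((cell.dropWhile pvCellWs).dropWhile pvCellDash).dropWhile pvCellWs) ++ '|' :: rest := by
  rw [dw_append_pipe pvCellWs (by decide), dw_append_pipe pvCellDash (by decide),
    dw_append_pipe pvCellWs (by decide)]

theorem sSplit_append_pipefree (cell rest : List Char) (h : ∀ x ∈ cell, x ≠ '|') :
    sSplit '|' (cell ++ '|' :: rest) = cell :: sSplit '|' rest := by
  induction cell with
  | nil => simp [sSplit]
  | cons a t ih =>
    have ha : a ≠ '|' := h a (by simp)
    simp only [List.cons_append, sSplit, ha, if_false]
    rw [ih (fun x hx => h x (by simp [hx]))]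
    simp [List.modifyHead]

theorem pvScan_nil : pvScan [] = true := by simp [pvScan]

theorem pvScan_cons (c : Char) (t : List Char) :
    pvScan (c :: t) =
      (if (((( c :: t).dropWhile pvCellWs).dropWhile pvCellDash).dropWhile pvCellWs).head? = some '|'
        then pvScan (((((c :: t).dropWhile pvCellWs).dropWhile pvCellDash).dropWhile pvCellWs).tail)
        else false) := by
  rw [pvScan]
  simp

theorem pvScan_ne_nil (l : List Char) (h : l ≠ []) :
    pvScan l =
      (if (((l.dropWhile pvCellWs).dropWhile pvCellDash).dropWhile pvCellWs).head? = some '|'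
        then pvScan (((l.dropWhile pvCellWs).dropWhile pvCellDash).dropWhile pvCellWs).tail
        else false) := by
  cases l with
  | nil => exact absurd rfl h
  | cons c t => exact pvScan_cons c t

theorem dropWhile_head_false {α : Type} (p : α → Bool) :
    ∀ (l t : List α) (c : α), l.dropWhile p = c :: t → p c = false := by
  intro l
  induction l with
  | nil => intro t c h; simp at h
  | cons a l' ih =>
    intro t c h
    rw [List.dropWhile_cons] at h
    split at h
    · exact ih t c h
    · rename_i hp
      obtain ⟨rfl, -⟩ := List.cons.inj h
      simpa using hp

theorem parse3_subset (r : List Char) :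
    ∀ x ∈ ((r.dropWhile pvCellWs).dropWhile pvCellDash).dropWhile pvCellWs, x ∈ r := by
  intro x hx
  exact ((List.dropWhile_sublist _).trans ((List.dropWhile_sublist _).trans
    (List.dropWhile_sublist _))).subset hx

theorem main_r : ∀ (n : Nat) (r : List Char), r.length ≤ n → r.all pvDomChar = true →
    pvScan r = ((sSplit '|' r).all cellOK && (r.isEmpty || decide (r.getLast? = some '|'))) := by
  intro n
  induction n with
  | zero =>
    intro r hlen _
    have : r = [] := List.eq_nil_of_length_eq_zero (by omega)
    subst this
    rw [pvScan_nil]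
    simp [sSplit, cellOK, PySem.Chars.strip, PySem.Chars.lstrip, PySem.Chars.rstrip]
  | succ n ih =>
    intro r hlen hdom
    cases hr : r with
    | nil =>
      rw [pvScan_nil]
      simp [sSplit, cellOK, PySem.Chars.strip, PySem.Chars.lstrip, PySem.Chars.rstrip]
    | cons c t =>
      subst hr
      have hsplit := List.takeWhile_append_dropWhile (p := fun x => !(x == '|')) (l := c :: t)
      set cell := (c :: t).takeWhile (fun x => !(x == '|')) with hcell
      set rst := (c :: t).dropWhile (fun x => !(x == '|')) with hrst
      have hcellfree : ∀ x ∈ cell, x ≠ '|' := by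
        intro x hx
        have := List.mem_takeWhile_imp hx
        simpa using this
      cases hr2 : rst with
      | nil =>
        have hfree : ∀ x ∈ (c :: t), x ≠ '|' := by
          rw [List.dropWhile_eq_nil_iff] at hr2
          intro x hx
          have := hr2 x hx
          simpa using this
        rw [pvScan_cons]
        have hhead : ((((c :: t).dropWhile pvCellWs).dropWhile pvCellDash).dropWhile pvCellWs).head? ≠ some '|' := by
          cases hl3 : (((c :: t).dropWhile pvCellWs).dropWhile pvCellDash).dropWhile pvCellWs with
          | nil => simp
          | cons x xs =>
            have hx : x ∈ (c :: t) := parse3_subset (c :: t) x (by rw [hl3]; simp)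
            simp only [List.head?_cons, ne_eq, Option.some.injEq]
            exact hfree x hx
        rw [if_neg hhead]
        have hlast : (c :: t).getLast? = some ((c :: t).getLast (by simp)) :=
          List.getLast?_eq_some_getLast (by simp)
        have hmem := List.mem_of_getLast? hlast
        have : ¬((c :: t).getLast? = some '|') := by
          rw [hlast]
          simp only [Option.some.injEq]
          exact fun he => hfree _ hmem he
        simp [this]
      | cons p' rest =>
        have hp' : p' = '|' := by
          have := dropWhile_head_false _ (c :: t) rest p' hr2
          simpa using this
        subst hp'
        have hdecomp : cell ++ '|' :: rest = c :: t := by rw [← hr2]; exact hsplit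
        have hrest_len : rest.length ≤ n := by
          have : (cell ++ '|' :: rest).length = (c :: t).length := by rw [hdecomp]
          simp only [List.length_append, List.length_cons] at this ⊢
          simp only [List.length_cons] at hlen
          omega
        have hdom' : ∀ x ∈ (c :: t), pvDomChar x = true := by
          rw [List.all_eq_true] at hdom; exact hdom
        have hcelldom : cell.all pvDomChar = true := by
          rw [List.all_eq_true]
          intro x hx
          exact hdom' x (by rw [← hdecomp]; simp [hx])
        have hrestdom : rest.all pvDomChar = true := by
          rw [List.all_eq_true]
          intro x hx
          exact hdom' x (by rw [← hdecomp]; simp [hx])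
        rw [← hdecomp]
        rw [pvScan_ne_nil _ (by simp)]
        rw [parse3_append]
        rw [sSplit_append_pipefree _ _ hcellfree]
        by_cases hcp : ((cell.dropWhile pvCellWs).dropWhile pvCellDash).dropWhile pvCellWs = []
        · rw [hcp, List.nil_append]
          rw [if_pos (by simp)]
          simp only [List.tail_cons]
          rw [ih rest hrest_len hrestdom]
          have hcOK : cellOK cell = true := (cell_parse cell hcelldom).mp hcp
          simp only [List.all_cons, hcOK, Bool.true_and]
          have hlast2 : ((cell ++ '|' :: rest).isEmpty || decide ((cell ++ '|' :: rest).getLast? = some '|'))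
              = (rest.isEmpty || decide (rest.getLast? = some '|')) := by
            rw [List.getLast?_append_of_ne_nil cell (by simp)]
            cases rest with
            | nil => simp
            | cons y ys =>
              rw [List.getLast?_cons_cons]
              simp
          rw [hlast2]
        · cases hcp2 : ((cell.dropWhile pvCellWs).dropWhile pvCellDash).dropWhile pvCellWs with
          | nil => exact absurd hcp2 hcp
          | cons x xs =>
            have hx : x ∈ cell := by
              have := parse3_subset cell x (by rw [hcp2]; simp)
              exact this
            rw [if_neg (by simp; exact fun h => (hcellfree x hx) h)]
            have hcOK : cellOK cell = false := by
              rcases hb : cellOK cell with _ | _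
              · rfl
              · exact absurd ((cell_parse cell hcelldom).mpr hb) hcp
            simp [hcOK]

theorem contains_pipe (c : Char) : (['|'] : List Char).contains c = (c == '|') := by
  by_cases hc : c = '|' <;> simp [hc]

theorem sSplit_append_pipe_any (m : List Char) :
    sSplit '|' (m ++ ['|']) = sSplit '|' m ++ [[]] := by
  induction m with
  | nil => simp [sSplit]
  | cons c m' ih =>
    by_cases hc : c = '|'
    · subst hc
      simp only [List.cons_append, sSplit, ih]
      rfl
    · simp only [List.cons_append, sSplit, if_neg hc, ih]
      cases hs : sSplit '|' m' with
      | nil => exact absurd hs (sSplit_ne_nil '|' m')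
      | cons a b => simp [List.modifyHead]

theorem L1 (l : List Char) :
    (sSplit '|' (l.dropWhile (fun c => c == '|'))).all cellOK = (sSplit '|' l).all cellOK := by
  induction l with
  | nil => rfl
  | cons c t ih =>
    by_cases hc : c = '|'
    · subst hc
      rw [List.dropWhile_cons_of_pos (by simp)]
      rw [ih]
      simp [sSplit, cellOK_nil]
    · rw [List.dropWhile_cons_of_neg (by simp [hc])]

theorem L2 (lr : List Char) :
    (sSplit '|' ((lr.dropWhile (fun c => c == '|')).reverse)).all cellOK =
      (sSplit '|' lr.reverse).all cellOK := by
  induction lr with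
  | nil => rfl
  | cons c t ih =>
    by_cases hc : c = '|'
    · subst hc
      rw [List.dropWhile_cons_of_pos (by simp)]
      rw [ih]
      rw [List.reverse_cons, sSplit_append_pipe_any]
      simp [cellOK_nil]
    · rw [List.dropWhile_cons_of_neg (by simp [hc])]

theorem strip_sublist (l : List Char) : List.Sublist (PySem.Chars.strip l) l := by
  unfold PySem.Chars.strip PySem.Chars.rstrip PySem.Chars.lstrip
  have h1 : List.Sublist
      (List.dropWhile PySem.Chars.isspace (List.dropWhile PySem.Chars.isspace l).reverse)
      ((List.dropWhile PySem.Chars.isspace l).reverse) := List.dropWhile_sublist _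
  have h2 := h1.reverse
  rw [List.reverse_reverse] at h2
  exact h2.trans (List.dropWhile_sublist _)

theorem singleton_suffix_iff (s : List Char) (a : Char) : [a] <:+ s ↔ s.getLast? = some a := by
  constructor
  · rintro ⟨t, rfl⟩
    rw [List.getLast?_append_of_ne_nil t (by simp)]
    rfl
  · intro h
    have hne : s ≠ [] := by intro hnil; rw [hnil] at h; simp at h
    have := List.getLast?_eq_some_getLast (l := s) hne
    rw [this] at h
    obtain rfl : s.getLast hne = a := by simpa using h
    exact ⟨s.dropLast, (List.dropLast_append_getLast hne)⟩

theorem singleton_prefix_iff (s : List Char) (a : Char) : [a] <+: s ↔ s.head? = some a := by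
  cases s with
  | nil => simp
  | cons c t =>
    constructor
    · rintro ⟨u, hu⟩
      obtain ⟨rfl, -⟩ := List.cons.inj hu
      rfl
    · intro h
      obtain rfl : a = c := by simpa using h.symm
      exact ⟨t, rfl⟩

theorem pv_core (sl : List Char) (hdom : sl.all pvDomChar = true) :
    (if !(PySem.Chars.startswith sl ['|'] && PySem.Chars.endswith sl ['|']) then false
     else
       let cells := (PySem.Chars.splitOn (PySem.Chars.stripChars sl ['|']) ['|']).map PySem.Chars.strip
       if cells.isEmpty then false
       else pvCheckCells cells)
    = (if PySem.Chars.startswith sl ['|'] then pvScan (sl.drop 1) else false) := by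
  cases hsw : PySem.Chars.startswith sl ['|'] with
  | false => simp
  | true =>
    have hpre : ['|'] <+: sl := (PySem.Chars.startswith_iff _ _).mp hsw
    rw [singleton_prefix_iff] at hpre
    obtain ⟨c, t, rfl⟩ : ∃ c t, sl = c :: t := by
      cases sl with
      | nil => simp at hpre
      | cons c t => exact ⟨c, t, rfl⟩
    obtain rfl : c = '|' := by simpa using hpre
    simp only [List.drop_succ_cons, List.drop_zero, Bool.true_and]
    have hdomt : t.all pvDomChar = true := by
      rw [List.all_eq_true] at hdom ⊢
      exact fun x hx => hdom x (by simp [hx])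
    cases hend : PySem.Chars.endswith ('|' :: t) ['|'] with
    | false =>
      rw [Bool.not_false, if_pos rfl]
      rw [main_r t.length t le_rfl hdomt]
      have hlastne : ¬(('|' :: t).getLast? = some '|') := by
        intro h
        exact absurd ((PySem.Chars.endswith_iff _ _).mpr ((singleton_suffix_iff _ _).mpr h))
          (by rw [hend]; simp)
      cases t with
      | nil => exact absurd rfl hlastne
      | cons y ys =>
        rw [List.getLast?_cons_cons] at hlastne
        simp [hlastne]
    | true =>
      rw [if_neg (by decide)]
      rw [splitOn_singleton]
      have hne := sSplit_ne_nil '|' (PySem.Chars.stripChars ('|' :: t) ['|'])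
      rw [if_neg (by
        simp only [List.isEmpty_iff, List.map_eq_nil_iff]
        exact hne)]
      rw [pvCheckCells_eq, List.all_map]
      have hfun : ((fun c => PySem.Chars.replace (PySem.Chars.replace c [':'] []) ['-'] [] == []) ∘
          PySem.Chars.strip) = cellOK := by
        funext c
        simp only [Function.comp_apply, okA_eq]
        rfl
      rw [hfun]
      have hstripchars : PySem.Chars.stripChars ('|' :: t) ['|'] =
          ((('|' :: t).dropWhile (fun c => c == '|')).reverse.dropWhile (fun c => c == '|')).reverse := by
        rw [show PySem.Chars.stripChars ('|' :: t) ['|'] =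
          (List.dropWhile (fun c => (['|'] : List Char).contains c)
            ((List.dropWhile (fun c => (['|'] : List Char).contains c) ('|' :: t)).reverse)).reverse from rfl]
        rw [dwCongr (fun c => (['|'] : List Char).contains c) (fun c => c == '|') ('|' :: t)
          (fun x _ => contains_pipe x)]
        rw [dwCongr (fun c => (['|'] : List Char).contains c) (fun c => c == '|') _
          (fun x _ => contains_pipe x)]
      rw [hstripchars]
      have hL2 := L2 ((('|' :: t).dropWhile (fun c => c == '|')).reverse)
      rw [List.reverse_reverse] at hL2
      rw [hL2, L1]
      rw [main_r t.length t le_rfl hdomt]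
      have hsecond : (t.isEmpty || decide (t.getLast? = some '|')) = true := by
        have hlast : ('|' :: t).getLast? = some '|' :=
          (singleton_suffix_iff _ _).mp ((PySem.Chars.endswith_iff _ _).mp hend)
        cases t with
        | nil => simp
        | cons y ys =>
          rw [List.getLast?_cons_cons] at hlast
          simp [hlast]
      rw [hsecond, Bool.and_true]
      simp [sSplit, cellOK_nil]

-- ===== VERDICT (by name: the statement is the Claim_ definition above) =====
theorem is_md_table_sep_py_spec : Claim_equal_is_md_table_sep_py := by
  intro line hdom
  unfold Spec_is_md_table_sep_py
  have hsdom : (PySem.Chars.strip line.toList).all pvDomChar = true := by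
    unfold Dom_is_md_table_sep_py pvDomStr at hdom
    rw [List.all_eq_true] at hdom ⊢
    exact fun x hx => hdom x ((strip_sublist line.toList).subset hx)
  exact pv_core (PySem.Chars.strip line.toList) hsdom
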